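-- pv_equiv track=rewrite | github.com/pwarnock/opencode-workflow-kit | scripts/commit-automation.py | _get_commit_prefix
-- ===== SOURCE A (Python) =====
-- from typing import List, Dict, Optional, Tuple
--
-- def _get_commit_prefix(issue_type: str, files: List[str]) -> str:
--     """Get conventional commit prefix based on issue type and files."""
--     if any('schemas/' in f for f in files):
--         return "chore"
--     elif any('README.md' in f or 'docs/' in f for f in files):
--         return "docs"
--     elif any('.py' in f for f in files):
--         return "feat"
--     elif any('test' in f for f in files):
--         return "test"
--     elif issue_type == 'bug':
--         return "fix"
--     elif issue_type == 'feature':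
--         return "feat"
--     elif issue_type == 'task':
--         return "chore"
--     else:
--         return "feat"
-- ===== SOURCE B (Python) =====
-- _PATTERNS = [['schemas/'], ['README.md', 'docs/'], ['.py'], ['test']]
-- _TABLE = ['chore', 'docs', 'feat', 'test']
-- _FALLBACK = {'bug': 'fix', 'feature': 'feat', 'task': 'chore'}
--
-- def _rank(f):
--     """Index of the first pattern group the file matches, 4 if none."""
--     return next((i for i, pats in enumerate(_PATTERNS) if any(p in f for p in pats)), 4)
--
-- def _get_commit_prefix(issue_type, files):
--     """Get conventional commit prefix based on issue type and files."""
--     r = min((_rank(f) for f in files), default=4)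
--     if r < 4:
--         return _TABLE[r]
--     return _FALLBACK.get(issue_type, 'feat')
-- ===== Notes on version B (the rewrite author's own statement) =====
-- stated objective: alternative
-- what changed: Replaces A's four prioritized any()-scans and elif-chain by a rank-and-minimize algorithm: each file is mapped to the index of the first pattern group it matches, the minimum rank over files selects the prefix from a table, and a dict lookup handles the issue_type fallback.
import Mathlib
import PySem

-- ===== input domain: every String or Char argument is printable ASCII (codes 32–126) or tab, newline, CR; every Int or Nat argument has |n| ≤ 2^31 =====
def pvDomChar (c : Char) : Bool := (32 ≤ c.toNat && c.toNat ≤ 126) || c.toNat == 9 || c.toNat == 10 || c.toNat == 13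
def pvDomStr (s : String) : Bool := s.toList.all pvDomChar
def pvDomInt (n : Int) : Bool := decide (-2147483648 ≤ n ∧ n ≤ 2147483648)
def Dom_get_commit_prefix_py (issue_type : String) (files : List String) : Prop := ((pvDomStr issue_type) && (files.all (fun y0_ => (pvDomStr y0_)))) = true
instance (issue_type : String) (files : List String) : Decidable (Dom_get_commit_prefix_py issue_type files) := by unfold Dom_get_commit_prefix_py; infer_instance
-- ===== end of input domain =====

-- ===== PORT A =====
-- One honest line: B replaces A's four prioritized any()-scans and elif-chain by ranking each file
-- (index of the first matching pattern group), minimizing the rank, and indexing a table; same cost, different algorithm.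
def get_commit_prefix_py (issue_type : String) (files : List String) : String :=
  if files.any (fun f => PySem.Str.isIn "schemas/" f) then "chore"
  else if files.any (fun f => PySem.Str.isIn "README.md" f || PySem.Str.isIn "docs/" f) then "docs"
  else if files.any (fun f => PySem.Str.isIn ".py" f) then "feat"
  else if files.any (fun f => PySem.Str.isIn "test" f) then "test"
  else if issue_type == "bug" then "fix"
  else if issue_type == "feature" then "feat"
  else if issue_type == "task" then "chore"
  else "feat"

-- ===== PORT B =====
-- rank f = index of the first pattern group that matches f, 4 if none (Source B's _rank)
def pvRankB (f : String) : Nat :=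
  if PySem.Str.isIn "schemas/" f then 0
  else if PySem.Str.isIn "README.md" f || PySem.Str.isIn "docs/" f then 1
  else if PySem.Str.isIn ".py" f then 2
  else if PySem.Str.isIn "test" f then 3
  else 4

-- table / fallback selection on the minimum rank (Source B's final if + dict get)
def pvPrefixOfRank (issue_type : String) (r : Nat) : String :=
  if r < 4 then (["chore", "docs", "feat", "test"].getD r "feat")
  else (PySem.Dict.getD (PySem.Dict.ofList [("bug", "fix"), ("feature", "feat"), ("task", "chore")]) issue_type "feat")

def get_commit_prefix_py_alt (issue_type : String) (files : List String) : String :=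
  pvPrefixOfRank issue_type (files.foldl (fun m f => min m (pvRankB f)) 4)

-- ===== PRECONDITION & SPEC =====
def Spec_get_commit_prefix_py (issue_type : String) (files : List String) (out : String) : Prop := out = get_commit_prefix_py_alt issue_type files
instance (issue_type : String) (files : List String) (out : String) : Decidable (Spec_get_commit_prefix_py issue_type files out) := by unfold Spec_get_commit_prefix_py; infer_instance

-- ===== CLAIM (what is proved, stated in full; the proofs are below) =====
def Claim_equal_get_commit_prefix_py : Prop := ∀ (issue_type : String) (files : List String), Dom_get_commit_prefix_py issue_type files → Spec_get_commit_prefix_py issue_type files (get_commit_prefix_py issue_type files)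

-- ===== LEMMAS AND PROOFS =====

-- The nested-if characterisation of the minimum rank over a list of files.
def pvMinRankSpec (files : List String) : Nat :=
  if files.any (fun f => PySem.Str.isIn "schemas/" f) then 0
  else if files.any (fun f => PySem.Str.isIn "README.md" f || PySem.Str.isIn "docs/" f) then 1
  else if files.any (fun f => PySem.Str.isIn ".py" f) then 2
  else if files.any (fun f => PySem.Str.isIn "test" f) then 3
  else 4

theorem min_rank_aux (a1 a2 a3 a4 s1 s2 s3 s4 : Bool) :
    min (if a1 then 0 else if a2 then 1 else if a3 then 2 else if a4 then 3 else 4)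
        (if s1 then 0 else if s2 then 1 else if s3 then 2 else if s4 then 3 else (4 : Nat))
    = (if a1 || s1 then 0 else if a2 || s2 then 1 else if a3 || s3 then 2 else if a4 || s4 then 3 else 4) := by
  revert a1 a2 a3 a4 s1 s2 s3 s4
  decide

theorem minRank_step (x : String) (xs : List String) :
    min (pvRankB x) (pvMinRankSpec xs) = pvMinRankSpec (x :: xs) := by
  simp only [pvRankB, pvMinRankSpec, List.any_cons]
  exact min_rank_aux _ _ _ _ _ _ _ _

theorem minRank_spec_le (files : List String) : pvMinRankSpec files ≤ 4 := by
  unfold pvMinRankSpec; split_ifs <;> omega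

theorem minRank_fold (files : List String) :
    ∀ b : Nat, b ≤ 4 → files.foldl (fun m f => min m (pvRankB f)) b = min b (pvMinRankSpec files) := by
  induction files with
  | nil => intro b hb; simp [pvMinRankSpec]; omega
  | cons x xs ih =>
    intro b hb
    simp only [List.foldl_cons]
    rw [ih (min b (pvRankB x)) (le_trans (min_le_left _ _) hb), ← minRank_step]
    omega

theorem pvPrefixOfRank_four (it : String) :
    pvPrefixOfRank it 4 = (PySem.Dict.getD (PySem.Dict.ofList [("bug", "fix"), ("feature", "feat"), ("task", "chore")]) it "feat") := rfl

theorem dict_default (it : String) (h1 : it ≠ "bug") (h2 : it ≠ "feature") (h3 : it ≠ "task") :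
    (PySem.Dict.getD (PySem.Dict.ofList [("bug", "fix"), ("feature", "feat"), ("task", "chore")]) it "feat") = "feat" := by
  have e1 : ("bug" == it) = false := beq_eq_false_iff_ne.mpr (Ne.symm h1)
  have e2 : ("feature" == it) = false := beq_eq_false_iff_ne.mpr (Ne.symm h2)
  have e3 : ("task" == it) = false := beq_eq_false_iff_ne.mpr (Ne.symm h3)
  simp [PySem.Dict.ofList, PySem.Dict.update, PySem.Dict.getD, PySem.Dict.get?, PySem.Dict.insert, PySem.Dict.empty, List.find?, e1, e2, e3]

-- ===== VERDICT (by name: the statement is the Claim_ definition above) =====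
theorem get_commit_prefix_py_spec : Claim_equal_get_commit_prefix_py := by
  intro issue_type files _
  unfold Spec_get_commit_prefix_py get_commit_prefix_py get_commit_prefix_py_alt
  rw [minRank_fold files 4 (le_refl 4), Nat.min_eq_right (minRank_spec_le files)]
  unfold pvMinRankSpec
  split_ifs with h1 h2 h3 h4 h5 h6 h7
  · rfl
  · rfl
  · rfl
  · rfl
  · rw [pvPrefixOfRank_four]; obtain rfl := eq_of_beq h5; decide
  · rw [pvPrefixOfRank_four]; obtain rfl := eq_of_beq h6; decide
  · rw [pvPrefixOfRank_four]; obtain rfl := eq_of_beq h7; decide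
  · rw [pvPrefixOfRank_four]
    exact (dict_default issue_type (by simpa using h5) (by simpa using h6) (by simpa using h7)).symm
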